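-- pv_equiv track=rewrite | github.com/Wayfarer98/AdventOfCode | 2023/Day14/day14.py | count_load
-- ===== SOURCE A (Python) =====
-- def count_load(column):
--     l = len(column)
--     stopping_point = 0
--     count = 0
--     for i in range(l):
--         if column[i] == "O":
--             count += l - stopping_point
--             stopping_point = stopping_point + 1
--         if column[i] == "#":
--             stopping_point = i + 1
--     return count
-- ===== SOURCE B (Python) =====
-- def count_load(column):
--     l = len(column)
--     total = 0
--     start = 0
--     k = 0
--     for i, c in enumerate(column):
--         if c == "O":
--             k += 1
--         elif c == "#":
--             total += k * (l - start) - k * (k - 1) // 2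
--             start = i + 1
--             k = 0
--     return total + k * (l - start) - k * (k - 1) // 2
-- ===== Notes on version B (the rewrite author's own statement) =====
-- stated objective: alternative
-- what changed: B groups the column into '#'-delimited segments and adds each segment's total load with the arithmetic-series closed form k*(l-start)-k*(k-1)//2, instead of A's per-rock accumulation with a running stopping point.
import Mathlib
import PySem

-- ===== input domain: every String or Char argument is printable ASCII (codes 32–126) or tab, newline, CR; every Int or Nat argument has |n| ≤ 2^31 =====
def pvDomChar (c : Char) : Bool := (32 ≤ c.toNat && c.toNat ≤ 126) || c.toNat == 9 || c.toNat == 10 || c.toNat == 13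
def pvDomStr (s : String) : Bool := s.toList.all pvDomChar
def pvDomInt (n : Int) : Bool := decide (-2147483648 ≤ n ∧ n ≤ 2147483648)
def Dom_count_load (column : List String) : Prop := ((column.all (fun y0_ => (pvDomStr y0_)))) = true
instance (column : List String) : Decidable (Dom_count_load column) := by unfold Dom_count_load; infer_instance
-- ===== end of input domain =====

-- B replaces A's per-rock accumulation by per-segment closed-form sums (alternative decomposition, same O(n) cost).

-- ===== PORT A =====
def count_load (column : List String) : Int :=
  ((PySem.List.pyRange 0 (column.length : Int) 1).foldl (fun (st : Int × Int) i =>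
      let st1 := if PySem.List.pyGetD column i "" == "O" then (st.1 + 1, st.2 + ((column.length : Int) - st.1)) else st
      if PySem.List.pyGetD column i "" == "#" then (i + 1, st1.2) else st1) (0, 0)).2

-- ===== PORT B =====
-- segment contribution: k rolled rocks occupying positions start..start+k-1
def segLoad (l start k : Int) : Int := k * (l - start) - PySem.Int.floordiv (k * (k - 1)) 2

def count_load_alt (column : List String) : Int :=
  let st :=
    (PySem.List.enumerate column 0).foldl (fun (st : Int × Int × Int) p =>
      if p.2 == "O" then (st.1, st.2.1 + 1, st.2.2)
      else if p.2 == "#" then (p.1 + 1, 0, st.2.2 + segLoad (column.length : Int) st.1 st.2.1)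
      else st) (0, 0, 0)
  st.2.2 + segLoad (column.length : Int) st.1 st.2.1

-- ===== PRECONDITION & SPEC =====
def Spec_count_load (column : List String) (out : Int) : Prop := out = count_load_alt column
instance (column : List String) (out : Int) : Decidable (Spec_count_load column out) := by unfold Spec_count_load; infer_instance

-- ===== CLAIM (what is proved, stated in full; the proofs are below) =====
def Claim_equal_count_load : Prop := ∀ (column : List String), Dom_count_load column → Spec_count_load column (count_load column)

-- ===== LEMMAS AND PROOFS =====

def stepA (l : Int) (st : Int × Int) (p : Int × String) : Int × Int :=
  let st1 := if p.2 == "O" then (st.1 + 1, st.2 + (l - st.1)) else st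
  if p.2 == "#" then (p.1 + 1, st1.2) else st1

def stepB (l : Int) (st : Int × Int × Int) (p : Int × String) : Int × Int × Int :=
  if p.2 == "O" then (st.1, st.2.1 + 1, st.2.2)
  else if p.2 == "#" then (p.1 + 1, 0, st.2.2 + segLoad l st.1 st.2.1)
  else st

lemma segLoad_zero (l start : Int) : segLoad l start 0 = 0 := by
  simp [segLoad, PySem.Int.floordiv]

lemma segLoad_succ (l start k : Int) :
    segLoad l start (k + 1) = segLoad l start k + (l - (start + k)) := by
  unfold segLoad
  rw [PySem.Int.floordiv_eq_ediv_of_pos (by omega), PySem.Int.floordiv_eq_ediv_of_pos (by omega)]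
  have h1 : (k + 1) * (k + 1 - 1) = k * (k - 1) + 2 * k := by ring
  obtain ⟨m, hm⟩ := Int.even_mul_pred_self k
  rw [h1, hm]
  have e1 : (m + m + 2 * k) / 2 = m + k := by omega
  have e2 : (m + m) / 2 = m := by omega
  rw [e1, e2]
  ring

lemma fold_eq (l : Int) (xs : List String) :
    ∀ (s start k total : Int), 0 ≤ k →
    (List.foldl (stepA l) (start + k, total + segLoad l start k) (PySem.List.enumerate xs s)).2
      = (fun st : Int × Int × Int => st.2.2 + segLoad l st.1 st.2.1)
          (List.foldl (stepB l) (start, k, total) (PySem.List.enumerate xs s)) := by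
  induction xs with
  | nil => intro s start k total hk; simp [PySem.List.enumerate]
  | cons x xs ih =>
    intro s start k total hk
    rw [PySem.List.enumerate_cons, List.foldl_cons, List.foldl_cons]
    by_cases hO : x = "O"
    · have : stepA l (start + k, total + segLoad l start k) (s, x)
          = (start + (k + 1), total + segLoad l start (k + 1)) := by
        simp [stepA, hO, segLoad_succ l start k]; constructor <;> ring
      rw [this]
      have : stepB l (start, k, total) (s, x) = (start, k + 1, total) := by
        simp [stepB, hO]
      rw [this]
      exact ih (s + 1) start (k + 1) total (by omega)
    · by_cases hH : x = "#"
      · have : stepA l (start + k, total + segLoad l start k) (s, x)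
            = (s + 1, (total + segLoad l start k) + segLoad l (s + 1) 0) := by
          simp [stepA, hH, segLoad_zero]
        rw [this]
        have : stepB l (start, k, total) (s, x) = (s + 1, 0, total + segLoad l start k) := by
          simp [stepB, hH]
        rw [this]
        have := ih (s + 1) (s + 1) 0 (total + segLoad l start k) (by omega)
        rw [segLoad_zero] at this
        simpa [segLoad_zero] using this
      · have hA : stepA l (start + k, total + segLoad l start k) (s, x)
            = (start + k, total + segLoad l start k) := by
          simp [stepA, hO, hH]
        have hB : stepB l (start, k, total) (s, x) = (start, k, total) := by
          simp [stepB, hO, hH]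
        rw [hA, hB]
        exact ih (s + 1) start k total hk

-- A's fold over range(l) with indexing equals the fold over the enumerated list
lemma a_fold_enumerate (column : List String) (init : Int × Int) :
    (PySem.List.pyRange 0 (column.length : Int) 1).foldl
        (fun (st : Int × Int) i =>
          let st1 := if PySem.List.pyGetD column i "" == "O" then (st.1 + 1, st.2 + ((column.length : Int) - st.1)) else st
          if PySem.List.pyGetD column i "" == "#" then (i + 1, st1.2) else st1) init
      = (PySem.List.enumerate column 0).foldl (stepA (column.length : Int)) init := by
  rw [PySem.List.enumerate_eq_map_pyRange (d := ""), List.foldl_map]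
  simp only [PySem.List.len_eq]
  rfl

-- ===== VERDICT (by name: the statement is the Claim_ definition above) =====
theorem count_load_spec : Claim_equal_count_load := by
  intro column _
  show count_load column = count_load_alt column
  have h := fold_eq (column.length : Int) column 0 0 0 0 le_rfl
  rw [segLoad_zero] at h
  norm_num at h
  have hA : count_load column
      = (List.foldl (stepA (column.length : Int)) (0, 0) (PySem.List.enumerate column 0)).2 := by
    unfold count_load
    rw [a_fold_enumerate]
  rw [hA]
  exact h
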